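-- pv_equiv track=rewrite | github.com/lucasbinder/mesh_terrain | app.py | normalize_selected_node_ids
-- ===== SOURCE A (Python) =====
-- def normalize_selected_node_ids(selected_node_ids, valid_ids=None):
--     valid_set = {str(node_id) for node_id in valid_ids} if valid_ids is not None else None
--     normalized = []
--     for value in selected_node_ids or []:
--         node_id = str(value)
--         if valid_set is not None and node_id not in valid_set:
--             continue
--         if node_id in normalized:
--             normalized.remove(node_id)
--         normalized.append(node_id)
--     return normalized[-2:]
-- ===== SOURCE B (Python) =====
-- def normalize_selected_node_ids(selected_node_ids, valid_ids=None):
--     valid_set = {str(node_id) for node_id in valid_ids} if valid_ids is not None else None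
--     seen = []
--     for value in reversed(list(selected_node_ids or [])):
--         node_id = str(value)
--         if valid_set is not None and node_id not in valid_set:
--             continue
--         if node_id in seen:
--             continue
--         seen.append(node_id)
--         if len(seen) == 2:
--             break
--     seen.reverse()
--     return seen
-- ===== Notes on version B (the rewrite author's own statement) =====
-- stated objective: alternative
-- what changed: Replaces A's forward move-to-end dedup of the whole list (`in`/`remove` on a growing list, then slicing [-2:]) by a single backward scan that collects at most two distinct valid ids and stops early, then reverses the two-element buffer.
import Mathlib
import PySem

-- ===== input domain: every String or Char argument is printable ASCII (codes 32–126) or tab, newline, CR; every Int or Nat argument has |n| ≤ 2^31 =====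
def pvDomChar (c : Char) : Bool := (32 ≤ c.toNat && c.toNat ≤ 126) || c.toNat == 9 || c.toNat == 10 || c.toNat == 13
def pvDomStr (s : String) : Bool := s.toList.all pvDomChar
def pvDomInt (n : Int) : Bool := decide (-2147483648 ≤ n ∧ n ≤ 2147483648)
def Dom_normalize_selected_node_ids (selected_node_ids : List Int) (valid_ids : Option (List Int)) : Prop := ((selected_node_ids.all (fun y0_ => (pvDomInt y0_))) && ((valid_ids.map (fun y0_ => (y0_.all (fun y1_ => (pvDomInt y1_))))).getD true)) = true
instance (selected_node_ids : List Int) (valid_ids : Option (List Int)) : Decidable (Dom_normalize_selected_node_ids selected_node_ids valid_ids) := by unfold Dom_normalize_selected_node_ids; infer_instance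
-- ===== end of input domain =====

-- B replaces A's move-to-end dedup of the whole list (build full dedup, then [-2:]) by a single
-- backward scan that collects at most two distinct valid ids and stops early; objective: alternative.

-- ===== PORT A =====
-- the loop body: normalized.remove(node_id) is guarded by `node_id in normalized`, so it is
-- exactly List.erase (PySem.List.remove?_eq_some_erase: remove? on a member is `some (erase)`)
def pvAStep (valid_set : Option (PySem.Set String)) (normalized : List String) (value : Int) : List String :=
  let node_id := PySem.Int.toStr value
  if (match valid_set with | some s => !PySem.Set.contains s node_id | none => false) then normalized
  else (if normalized.contains node_id then normalized.erase node_id else normalized) ++ [node_id]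

def normalize_selected_node_ids (selected_node_ids : List Int) (valid_ids : Option (List Int)) : List String :=
  let valid_set : Option (PySem.Set String) :=
    valid_ids.map (fun l => PySem.Set.ofList (l.map PySem.Int.toStr))
  let normalized := selected_node_ids.foldl (pvAStep valid_set) []
  PySem.List.slice normalized (some (-2)) none

-- ===== PORT B =====
-- backward scan: skip invalid / already-seen ids, append, break at two; finally reverse `seen`
def pvBGo (valid_set : Option (PySem.Set String)) : List Int → List String → List String
  | [], seen => seen
  | value :: rest, seen =>
    let node_id := PySem.Int.toStr value
    if (match valid_set with | some s => !PySem.Set.contains s node_id | none => false) then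
      pvBGo valid_set rest seen
    else if seen.contains node_id then pvBGo valid_set rest seen
    else if (seen ++ [node_id]).length == 2 then seen ++ [node_id]
    else pvBGo valid_set rest (seen ++ [node_id])

def normalize_selected_node_ids_alt (selected_node_ids : List Int) (valid_ids : Option (List Int)) : List String :=
  let valid_set : Option (PySem.Set String) :=
    valid_ids.map (fun l => PySem.Set.ofList (l.map PySem.Int.toStr))
  (pvBGo valid_set selected_node_ids.reverse []).reverse

-- ===== PRECONDITION & SPEC =====
def Spec_normalize_selected_node_ids (selected_node_ids : List Int) (valid_ids : Option (List Int)) (out : List String) : Prop := out = normalize_selected_node_ids_alt selected_node_ids valid_ids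
instance (selected_node_ids : List Int) (valid_ids : Option (List Int)) (out : List String) : Decidable (Spec_normalize_selected_node_ids selected_node_ids valid_ids out) := by unfold Spec_normalize_selected_node_ids; infer_instance

-- ===== CLAIM (what is proved, stated in full; the proofs are below) =====
def Claim_equal_normalize_selected_node_ids : Prop := ∀ (selected_node_ids : List Int) (valid_ids : Option (List Int)), Dom_normalize_selected_node_ids selected_node_ids valid_ids → Spec_normalize_selected_node_ids selected_node_ids valid_ids (normalize_selected_node_ids selected_node_ids valid_ids)

-- ===== LEMMAS AND PROOFS =====

-- first-occurrence dedup, the common spec for both loops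
def pvD : List String → List String
  | [] => []
  | x :: l => x :: pvD (l.filter (fun a => a ≠ x))
termination_by l => l.length
decreasing_by
  simp only [List.length_cons, List.length_unattach]
  exact Nat.lt_succ_of_le (le_trans (List.length_filter_le _ _) (by simp))

theorem pvD_cons (x : String) (l : List String) :
    pvD (x :: l) = x :: pvD (l.filter (fun a => a ≠ x)) := by
  rw [pvD]

theorem pvD_induct (P : List String → Prop) (h0 : P [])
    (h1 : ∀ x l, P (l.filter (fun a => a ≠ x)) → P (x :: l)) : ∀ l, P l := by
  intro l
  induction hn : l.length using Nat.strong_induction_on generalizing l with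
  | _ n ih =>
    cases l with
    | nil => exact h0
    | cons x t =>
      refine h1 x t (ih (t.filter (fun a => a ≠ x)).length ?_ _ rfl)
      subst hn
      exact Nat.lt_succ_of_le (List.length_filter_le _ _)

theorem pvD_subset (l : List String) (a : String) (h : a ∈ pvD l) : a ∈ l := by
  induction l using pvD_induct with
  | h0 => simp [pvD] at h
  | h1 x l ih =>
    rw [pvD_cons] at h
    rcases List.mem_cons.1 h with h | h
    · simp [h]
    · exact List.mem_cons_of_mem _ (List.mem_of_mem_filter (ih h))

theorem pvD_nodup (l : List String) : (pvD l).Nodup := by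
  induction l using pvD_induct with
  | h0 => simp [pvD]
  | h1 x l ih =>
    rw [pvD_cons]
    refine List.nodup_cons.2 ⟨fun h => ?_, ih⟩
    have := pvD_subset _ _ h
    simp at this

theorem pvD_filter (l : List String) (p : String → Bool) :
    (pvD l).filter p = pvD (l.filter p) := by
  induction l using pvD_induct with
  | h0 => simp [pvD]
  | h1 x l ih =>
    rw [pvD_cons]
    by_cases hp : p x = true
    · rw [List.filter_cons_of_pos hp, ih, List.filter_cons_of_pos hp, pvD_cons]
      congr 1
      rw [List.filter_filter, List.filter_filter]
      congr 1
      refine List.filter_congr ?_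
      intro a _
      simp [Bool.and_comm]
    · rw [List.filter_cons_of_neg hp, ih, List.filter_cons_of_neg hp]
      congr 1
      rw [List.filter_filter]
      refine List.filter_congr ?_
      intro a _
      by_cases h2 : p a = true
      · have hax : a ≠ x := fun e => hp (e ▸ h2)
        simp [h2, hax]
      · simp [h2]

-- A's fold computes the reversed first-occurrence dedup of the reversed (filtered) input
def pvKeep (vs : Option (PySem.Set String)) (s : String) : Bool :=
  match vs with | some t => PySem.Set.contains t s | none => true

def pvStep (n : List String) (s : String) : List String := n.erase s ++ [s]

theorem pvAStep_eq (vs : Option (PySem.Set String)) (n : List String) (v : Int) :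
    pvAStep vs n v = if pvKeep vs (PySem.Int.toStr v) then pvStep n (PySem.Int.toStr v) else n := by
  cases vs with
  | none =>
    by_cases h : PySem.Int.toStr v ∈ n
    · simp [pvAStep, pvStep, pvKeep, h]
    · simp [pvAStep, pvStep, pvKeep, h, List.erase_of_not_mem h]
  | some s =>
    by_cases hk : PySem.Int.toStr v ∈ s
    · by_cases h : PySem.Int.toStr v ∈ n
      · simp [pvAStep, pvStep, pvKeep, hk, h]
      · simp [pvAStep, pvStep, pvKeep, hk, h, List.erase_of_not_mem h]
    · simp [pvAStep, pvStep, pvKeep, hk]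

theorem pvA_fold (l t : List String) :
    l.foldl pvStep (pvD t).reverse = (pvD (l.reverse ++ t)).reverse := by
  induction l generalizing t with
  | nil => simp
  | cons x l ih =>
    have hstep : pvStep ((pvD t).reverse) x = (pvD (x :: t)).reverse := by
      rw [pvD_cons]
      simp only [pvStep, List.reverse_cons]
      congr 1
      rw [List.Nodup.erase_eq_filter ((List.nodup_reverse.mpr (pvD_nodup t))), List.filter_reverse]
      congr 1
      rw [show (fun (a : String) => a != x) = (fun a => decide (a ≠ x)) from by
        funext a; by_cases h : a = x <;> simp [h]]
      exact pvD_filter t _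
    rw [List.foldl_cons, hstep, ih (x :: t)]
    congr 2
    simp

theorem pvGuard_eq (vs : Option (PySem.Set String)) (nid : String) :
    (match vs with | some s => !PySem.Set.contains s nid | none => false) = !pvKeep vs nid := by
  cases vs <;> rfl

theorem pvBGo_cons (vs : Option (PySem.Set String)) (v : Int) (rest : List Int)
    (seen : List String) :
    pvBGo vs (v :: rest) seen =
      if pvKeep vs (PySem.Int.toStr v) then
        (if seen.contains (PySem.Int.toStr v) then pvBGo vs rest seen
         else if (seen ++ [PySem.Int.toStr v]).length == 2 then seen ++ [PySem.Int.toStr v]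
         else pvBGo vs rest (seen ++ [PySem.Int.toStr v]))
      else pvBGo vs rest seen := by
  simp only [pvBGo, pvGuard_eq]
  cases pvKeep vs (PySem.Int.toStr v) <;> simp

theorem pvB_go (vs : Option (PySem.Set String)) (l : List Int) (seen : List String)
    (hn : seen.Nodup) (hl : seen.length ≤ 1) :
    pvBGo vs l seen =
      (seen ++ pvD (((l.map PySem.Int.toStr).filter (pvKeep vs)).filter
        (fun a => !seen.contains a))).take 2 := by
  induction l generalizing seen with
  | nil =>
    simp [pvBGo, pvD]
    omega
  | cons v rest ih =>
    rw [pvBGo_cons]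
    by_cases hk : pvKeep vs (PySem.Int.toStr v) = true
    · by_cases hc : seen.contains (PySem.Int.toStr v) = true
      · have hdrop : (((v :: rest).map PySem.Int.toStr).filter (pvKeep vs)).filter
            (fun a => !seen.contains a) =
            ((rest.map PySem.Int.toStr).filter (pvKeep vs)).filter
            (fun a => !seen.contains a) := by
          simp only [List.map_cons, List.filter_cons, hk, if_true, hc]
          simp
        rw [hdrop, if_pos hk, if_pos hc, ih seen hn hl]
      · have hkeep : (((v :: rest).map PySem.Int.toStr).filter (pvKeep vs)).filter
            (fun a => !seen.contains a) =
            PySem.Int.toStr v :: (((rest.map PySem.Int.toStr).filter (pvKeep vs)).filter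
            (fun a => !seen.contains a)) := by
          simp only [List.map_cons, List.filter_cons, hk, if_true, hc]
          simp [hc]
        rw [hkeep, if_pos hk, if_neg hc, pvD_cons]
        by_cases h2 : (seen ++ [PySem.Int.toStr v]).length == 2
        · rw [if_pos h2]
          obtain ⟨a, ha⟩ : ∃ a, seen = [a] := by
            cases seen with
            | nil => simp at h2
            | cons a t => cases t with
              | nil => exact ⟨a, rfl⟩
              | cons b t => simp at h2
          subst ha
          simp
        · rw [if_neg h2]
          have hseen : seen = [] := by
            cases seen with
            | nil => rfl
            | cons a t =>
              exfalso
              apply h2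
              simp at hl ⊢
              omega
          subst hseen
          simp only [List.nil_append]
          rw [ih [PySem.Int.toStr v] (by simp) (by simp)]
          simp only [List.nil_append, List.singleton_append]
          congr 2
          rw [show (List.filter (fun a => !List.contains [] a)
              ((rest.map PySem.Int.toStr).filter (pvKeep vs))).filter
              (fun a => a ≠ PySem.Int.toStr v) =
              ((rest.map PySem.Int.toStr).filter (pvKeep vs)).filter
              (fun a => a ≠ PySem.Int.toStr v) from by simp]
          refine congrArg pvD (List.filter_congr ?_)
          intro a _
          by_cases hava : a = PySem.Int.toStr v <;> simp [hava]
    · have hdrop : (((v :: rest).map PySem.Int.toStr).filter (pvKeep vs)).filter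
          (fun a => !seen.contains a) =
          ((rest.map PySem.Int.toStr).filter (pvKeep vs)).filter
          (fun a => !seen.contains a) := by
        simp only [List.map_cons, List.filter_cons]
        rw [show pvKeep vs (PySem.Int.toStr v) = false from by simpa using hk]
        simp
      rw [hdrop, if_neg hk, ih seen hn hl]

theorem pvA_fold_filter (vs : Option (PySem.Set String)) (l : List Int) (n : List String) :
    l.foldl (pvAStep vs) n = ((l.map PySem.Int.toStr).filter (pvKeep vs)).foldl pvStep n := by
  induction l generalizing n with
  | nil => rfl
  | cons v l ih =>
    by_cases hk : pvKeep vs (PySem.Int.toStr v) = true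
    · simp only [List.foldl_cons, List.map_cons, List.filter_cons, hk, if_true,
        pvAStep_eq, ih]
    · simp only [List.foldl_cons, List.map_cons, List.filter_cons, pvAStep_eq, ih]
      rw [show pvKeep vs (PySem.Int.toStr v) = false from by simpa using hk]
      simp

-- ===== VERDICT (by name: the statement is the Claim_ definition above) =====
theorem normalize_selected_node_ids_spec : Claim_equal_normalize_selected_node_ids := by
  intro xs vids _
  unfold Spec_normalize_selected_node_ids normalize_selected_node_ids normalize_selected_node_ids_alt
  simp only []
  set vs : Option (PySem.Set String) :=
    vids.map (fun l => PySem.Set.ofList (l.map PySem.Int.toStr)) with hvs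
  set ys : List String := (xs.map PySem.Int.toStr).filter (pvKeep vs) with hys
  have hA : xs.foldl (pvAStep vs) [] = (pvD ys.reverse).reverse := by
    rw [pvA_fold_filter]
    have h0 : ([] : List String) = (pvD []).reverse := by simp [pvD]
    rw [← hys, h0, pvA_fold, List.append_nil]
  have hB : pvBGo vs xs.reverse [] = (pvD ys.reverse).take 2 := by
    rw [pvB_go vs xs.reverse [] (by simp) (by simp)]
    have : ((xs.reverse.map PySem.Int.toStr).filter (pvKeep vs)).filter
        (fun a => !List.contains [] a) = ys.reverse := by
      simp [hys, List.filter_reverse]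
    rw [this, List.nil_append]
  rw [hA, hB]
  rw [PySem.List.slice_from_neg_ofNat _ 2 (by omega)]
  rw [List.length_reverse]
  have hlen : (pvD ys.reverse).reverse.drop ((pvD ys.reverse).length - 2) =
      ((pvD ys.reverse).take 2).reverse := (List.reverse_take).symm
  exact hlen
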